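-- pv_equiv track=rewrite | github.com/e-cesar9/spacex-orbital-intelligence | backend/app/services/spacetrack.py | _get_purpose
-- ===== SOURCE A (Python) =====
-- def _get_purpose(name: str) -> str:
--     """Infer satellite purpose from name."""
--     name_upper = name.upper()
--     if "STARLINK" in name_upper:
--         return "Internet/Communications"
--     elif "COSMOS" in name_upper or "KOSMOS" in name_upper:
--         return "Military/Government"
--     elif "ISS" in name_upper:
--         return "Space Station"
--     elif "GPS" in name_upper or "NAVSTAR" in name_upper:
--         return "Navigation"
--     elif "WEATHER" in name_upper or "NOAA" in name_upper or "METEO" in name_upper: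
--         return "Weather"
--     elif any(x in name_upper for x in ["DEB", "R/B", "DEBRIS"]):
--         return "Debris"
--     else:
--         return "Unknown"
-- ===== SOURCE B (Python) =====
-- _KEYWORDS = [
--     ("STARLINK", 0), ("COSMOS", 1), ("KOSMOS", 1), ("ISS", 2),
--     ("GPS", 3), ("NAVSTAR", 3), ("WEATHER", 4), ("NOAA", 4), ("METEO", 4),
--     ("DEB", 5), ("R/B", 5), ("DEBRIS", 5),
-- ]
-- _LABELS = ["Internet/Communications", "Military/Government", "Space Station",
--            "Navigation", "Weather", "Debris", "Unknown"]
--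
--
-- def _get_purpose(name: str) -> str:
--     """Infer satellite purpose from name."""
--     u = name.upper()
--     best = 6
--     for i in range(len(u)):
--         for kw, p in _KEYWORDS:
--             if p < best and u.startswith(kw, i):
--                 best = p
--     return _LABELS[best]
-- ===== Notes on version B (the rewrite author's own statement) =====
-- stated objective: alternative
-- what changed: Replaced the if/elif chain of per-keyword substring tests by a single left-to-right scan over string positions that checks anchored keyword prefixes and keeps the minimum matched priority, then indexes a label table.
import Mathlib
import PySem

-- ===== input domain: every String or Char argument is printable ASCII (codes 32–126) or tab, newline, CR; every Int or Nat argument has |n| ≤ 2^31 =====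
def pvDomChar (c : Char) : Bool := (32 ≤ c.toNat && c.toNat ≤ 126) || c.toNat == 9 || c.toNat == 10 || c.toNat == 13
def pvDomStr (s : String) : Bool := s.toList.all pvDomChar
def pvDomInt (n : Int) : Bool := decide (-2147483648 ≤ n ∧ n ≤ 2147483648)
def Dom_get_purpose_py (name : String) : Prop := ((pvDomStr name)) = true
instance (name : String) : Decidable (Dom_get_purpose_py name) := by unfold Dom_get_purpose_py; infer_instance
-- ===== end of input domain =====

-- B replaces A's if/elif substring chain by one left-to-right scan over positions keeping the minimum matched keyword priority (alternative algorithm; same asymptotic cost).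


-- ===== PORT A =====
def get_purpose_py (name : String) : String :=
  let name_upper := PySem.Str.upper name
  if PySem.Str.isIn "STARLINK" name_upper then "Internet/Communications"
  else if PySem.Str.isIn "COSMOS" name_upper || PySem.Str.isIn "KOSMOS" name_upper then "Military/Government"
  else if PySem.Str.isIn "ISS" name_upper then "Space Station"
  else if PySem.Str.isIn "GPS" name_upper || PySem.Str.isIn "NAVSTAR" name_upper then "Navigation"
  else if PySem.Str.isIn "WEATHER" name_upper || PySem.Str.isIn "NOAA" name_upper || PySem.Str.isIn "METEO" name_upper then "Weather"
  else if ["DEB", "R/B", "DEBRIS"].any (fun x => PySem.Str.isIn x name_upper) then "Debris"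
  else "Unknown"

-- ===== PORT B =====
-- _KEYWORDS: (keyword, priority) pairs; _LABELS: label by priority, 6 = Unknown
def pvKws : List (List Char × Nat) :=
  [("STARLINK".toList, 0), ("COSMOS".toList, 1), ("KOSMOS".toList, 1), ("ISS".toList, 2),
   ("GPS".toList, 3), ("NAVSTAR".toList, 3), ("WEATHER".toList, 4), ("NOAA".toList, 4), ("METEO".toList, 4),
   ("DEB".toList, 5), ("R/B".toList, 5), ("DEBRIS".toList, 5)]

def pvLabels : List String :=
  ["Internet/Communications", "Military/Government", "Space Station",
   "Navigation", "Weather", "Debris", "Unknown"]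

-- u.startswith(kw, i) with 0 ≤ i ≤ len(u) is exactly Chars.startswith (u.drop i) kw
def get_purpose_py_alt (name : String) : String :=
  let u := (PySem.Str.upper name).toList
  let best := (List.range u.length).foldl
    (fun b i => pvKws.foldl
      (fun b kp => if kp.2 < b ∧ PySem.Chars.startswith (u.drop i) kp.1 = true then kp.2 else b) b) 6
  pvLabels.getD best "Unknown"

-- ===== PRECONDITION & SPEC =====
def Spec_get_purpose_py (name : String) (out : String) : Prop := out = get_purpose_py_alt name
instance (name : String) (out : String) : Decidable (Spec_get_purpose_py name out) := by unfold Spec_get_purpose_py; infer_instance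

-- ===== CLAIM (what is proved, stated in full; the proofs are below) =====
def Claim_equal_get_purpose_py : Prop := ∀ (name : String), Dom_get_purpose_py name → Spec_get_purpose_py name (get_purpose_py name)

-- ===== LEMMAS AND PROOFS =====

lemma pv_min_cases (a b : Nat) : Nat.min a b ≤ a ∧ Nat.min a b ≤ b ∧ (Nat.min a b = a ∨ Nat.min a b = b) := by
  simp only [Nat.min_def]; split <;> omega

lemma pvKws_ne : ∀ kp ∈ pvKws, kp.1 ≠ [] := by decide

-- inner loop = fold of Nat.min over the priorities of the keywords matched at this position
lemma inner_filter (c : List Char × Nat → Bool) (l : List (List Char × Nat)) (b : Nat) :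
    l.foldl (fun b kp => if kp.2 < b ∧ c kp = true then kp.2 else b) b
      = ((l.filter c).map Prod.snd).foldl Nat.min b := by
  induction l generalizing b with
  | nil => rfl
  | cons kp l ih =>
      by_cases h : c kp = true
      · simp only [List.foldl, List.filter_cons_of_pos h, List.map_cons]
        rw [ih]
        congr 1
        simp only [h, and_true, Nat.min_def]
        split <;> split <;> omega
      · rw [List.filter_cons_of_neg h]
        simp only [List.foldl]
        rw [if_neg (by simp [h])]
        exact ih b

lemma foldl_min_mem (L : List Nat) (b : Nat) : L.foldl Nat.min b ∈ b :: L := by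
  induction L generalizing b with
  | nil => simp
  | cons a L ih =>
      simp only [List.foldl]
      rcases List.mem_cons.mp (ih (Nat.min b a)) with he | he
      · rcases (pv_min_cases b a).2.2 with h | h <;> rw [he, h] <;> simp
      · simp [he]

lemma foldl_min_le (L : List Nat) (b : Nat) : ∀ x ∈ b :: L, L.foldl Nat.min b ≤ x := by
  induction L generalizing b with
  | nil => simp
  | cons a L ih =>
      intro x hx
      simp only [List.foldl]
      have hhead : List.foldl Nat.min (Nat.min b a) L ≤ Nat.min b a :=
        ih (Nat.min b a) (Nat.min b a) (by simp)
      obtain ⟨hl, hr, -⟩ := pv_min_cases b a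
      rcases List.mem_cons.mp hx with h | hx'
      · subst h; exact le_trans hhead hl
      rcases List.mem_cons.mp hx' with h | h
      · subst h; exact le_trans hhead hr
      · exact ih (Nat.min b a) x (List.mem_cons_of_mem _ h)

lemma foldl_min_congr (L M : List Nat) (b : Nat) (h : ∀ a, a ∈ L ↔ a ∈ M) :
    L.foldl Nat.min b = M.foldl Nat.min b := by
  apply Nat.le_antisymm
  · rcases List.mem_cons.mp (foldl_min_mem M b) with he | he
    · rw [he]; exact foldl_min_le L b b (by simp)
    · rw [show M.foldl Nat.min b = M.foldl Nat.min b from rfl]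
      exact foldl_min_le L b _ (List.mem_cons_of_mem _ ((h _).mpr he))
  · rcases List.mem_cons.mp (foldl_min_mem L b) with he | he
    · rw [he]; exact foldl_min_le M b b (by simp)
    · exact foldl_min_le M b _ (List.mem_cons_of_mem _ ((h _).mp he))

lemma foldl_foldl_min_flatMap (l : List Nat) (f : Nat → List Nat) (b : Nat) :
    l.foldl (fun b i => (f i).foldl Nat.min b) b = (l.flatMap f).foldl Nat.min b := by
  induction l generalizing b with
  | nil => rfl
  | cons a l ih => simp [List.foldl, List.flatMap_cons, List.foldl_append, ih]

-- a nonempty keyword is a prefix at some position < length iff it is a substring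
lemma exists_pos_startswith_iff (u kw : List Char) (hne : kw ≠ []) :
    (∃ i ∈ List.range u.length, PySem.Chars.startswith (u.drop i) kw = true)
      ↔ PySem.Chars.isIn kw u = true := by
  rw [← PySem.Chars.exists_prefix_drop_iff_isIn]
  constructor
  · rintro ⟨i, _, h⟩
    exact ⟨i, (PySem.Chars.startswith_iff _ _).mp h⟩
  · rintro ⟨j, h⟩
    refine ⟨j, ?_, (PySem.Chars.startswith_iff _ _).mpr h⟩
    rw [List.mem_range]
    by_contra hj
    rw [List.drop_eq_nil_of_le (Nat.le_of_not_lt (by simpa using hj))] at h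
    exact hne (List.prefix_nil.mp h)

-- the two-loop scan equals a single fold over pvKws gated by substring membership
lemma scan_eq_kw_fold (u : List Char) :
    (List.range u.length).foldl
      (fun b i => pvKws.foldl
        (fun b kp => if kp.2 < b ∧ PySem.Chars.startswith (u.drop i) kp.1 = true then kp.2 else b) b) 6
    = pvKws.foldl (fun b kp => if PySem.Chars.isIn kp.1 u = true then Nat.min b kp.2 else b) 6 := by
  have h1 : ∀ (l : List (List Char × Nat)) (b : Nat),
      l.foldl (fun b kp => if PySem.Chars.isIn kp.1 u = true then Nat.min b kp.2 else b) b
      = ((l.filter (fun kp => PySem.Chars.isIn kp.1 u)).map Prod.snd).foldl Nat.min b := by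
    intro l
    induction l with
    | nil => intro b; rfl
    | cons kp l ih =>
        intro b
        cases h : PySem.Chars.isIn kp.1 u with
        | true => simpa [List.filter_cons, h] using ih (Nat.min b kp.2)
        | false => simpa [List.filter_cons, h] using ih b
  have h2 : ∀ i b, pvKws.foldl
        (fun b kp => if kp.2 < b ∧ PySem.Chars.startswith (u.drop i) kp.1 = true then kp.2 else b) b
      = ((pvKws.filter (fun kp => PySem.Chars.startswith (u.drop i) kp.1)).map Prod.snd).foldl Nat.min b := by
    intro i b; exact inner_filter _ _ _
  simp only [h1, h2]
  rw [foldl_foldl_min_flatMap]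
  apply foldl_min_congr
  intro a
  simp only [List.mem_flatMap, List.mem_map, List.mem_filter]
  constructor
  · rintro ⟨i, hi, kp, ⟨hkp, hsw⟩, rfl⟩
    exact ⟨kp, ⟨hkp, (exists_pos_startswith_iff u kp.1 (pvKws_ne kp hkp)).mp ⟨i, hi, hsw⟩⟩, rfl⟩
  · rintro ⟨kp, ⟨hkp, hin⟩, rfl⟩
    obtain ⟨i, hi, hsw⟩ := (exists_pos_startswith_iff u kp.1 (pvKws_ne kp hkp)).mpr hin
    exact ⟨i, hi, kp, ⟨hkp, hsw⟩, rfl⟩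

-- finite bridge: labels[min matched priority] = A's branch chain, for any truth values of the 12 tests
lemma bool_bridge (s k1 k2 i g1 g2 w1 w2 w3 d1 d2 d3 : Bool) :
    pvLabels.getD
      (([((s : Bool), 0), (k1, 1), (k2, 1), (i, 2), (g1, 3), (g2, 3), (w1, 4), (w2, 4), (w3, 4),
         (d1, 5), (d2, 5), (d3, 5)] : List (Bool × Nat)).foldl
        (fun b x => if x.1 = true then Nat.min b x.2 else b) 6) "Unknown"
    = (if s then "Internet/Communications"
       else if k1 || k2 then "Military/Government"
       else if i then "Space Station"
       else if g1 || g2 then "Navigation"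
       else if w1 || w2 || w3 then "Weather"
       else if d1 || (d2 || d3) then "Debris"
       else "Unknown") := by
  cases s <;> cases k1 <;> cases k2 <;> cases i <;> cases g1 <;> cases g2 <;>
    cases w1 <;> cases w2 <;> cases w3 <;> cases d1 <;> cases d2 <;> cases d3 <;> rfl

-- the keyword fold on a concrete u, read off against A's branch chain
lemma kw_fold_bridge (u : List Char) :
    pvLabels.getD
      (pvKws.foldl (fun b kp => if PySem.Chars.isIn kp.1 u = true then Nat.min b kp.2 else b) 6)
      "Unknown"
    = (if PySem.Chars.isIn "STARLINK".toList u then "Internet/Communications"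
       else if PySem.Chars.isIn "COSMOS".toList u || PySem.Chars.isIn "KOSMOS".toList u then "Military/Government"
       else if PySem.Chars.isIn "ISS".toList u then "Space Station"
       else if PySem.Chars.isIn "GPS".toList u || PySem.Chars.isIn "NAVSTAR".toList u then "Navigation"
       else if PySem.Chars.isIn "WEATHER".toList u || PySem.Chars.isIn "NOAA".toList u || PySem.Chars.isIn "METEO".toList u then "Weather"
       else if PySem.Chars.isIn "DEB".toList u || (PySem.Chars.isIn "R/B".toList u || PySem.Chars.isIn "DEBRIS".toList u) then "Debris"
       else "Unknown") :=
  bool_bridge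
    (PySem.Chars.isIn "STARLINK".toList u) (PySem.Chars.isIn "COSMOS".toList u)
    (PySem.Chars.isIn "KOSMOS".toList u) (PySem.Chars.isIn "ISS".toList u)
    (PySem.Chars.isIn "GPS".toList u) (PySem.Chars.isIn "NAVSTAR".toList u)
    (PySem.Chars.isIn "WEATHER".toList u) (PySem.Chars.isIn "NOAA".toList u)
    (PySem.Chars.isIn "METEO".toList u) (PySem.Chars.isIn "DEB".toList u)
    (PySem.Chars.isIn "R/B".toList u) (PySem.Chars.isIn "DEBRIS".toList u)

-- ===== VERDICT (by name: the statement is the Claim_ definition above) =====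
theorem get_purpose_py_spec : Claim_equal_get_purpose_py := by
  intro name _
  unfold Spec_get_purpose_py
  have halt : get_purpose_py_alt name
      = pvLabels.getD
          (pvKws.foldl
            (fun b kp => if PySem.Chars.isIn kp.1 ((PySem.Str.upper name).toList) = true
              then Nat.min b kp.2 else b) 6) "Unknown" := by
    unfold get_purpose_py_alt
    dsimp only
    rw [scan_eq_kw_fold]
  rw [halt, kw_fold_bridge]
  unfold get_purpose_py
  dsimp only
  simp only [PySem.Str.isIn_eq, List.any_cons, List.any_nil, Bool.or_false]
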